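-- pv_equiv track=rewrite | github.com/xdlaba02/Advent-Of-Code-2023 | 14/part1.py | tilt_left_score
-- ===== SOURCE A (Python) =====
-- def tilt_left_score(line):
-- 	score = 0
--
-- 	free_spot = 0
-- 	for i, c in enumerate(line):
-- 		if c == "#":
-- 			free_spot = i + 1
-- 		elif c == "O":
-- 			score += len(line) - free_spot
-- 			free_spot += 1
--
-- 	return score
-- ===== SOURCE B (Python) =====
-- def tilt_left_score(line):
--     N = len(line)
--     total = 0
--     start = 0
--     for seg in line.split('#'):
--         c = seg.count('O')
--         total += c * N - c * start - c * (c - 1) // 2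
--         start += len(seg) + 1
--     return total
-- ===== Notes on version B (the rewrite author's own statement) =====
-- stated objective: alternative
-- what changed: Replaces the per-character free_spot simulation with split('#') into segments plus a closed-form arithmetic-series score (c*N - c*start - c*(c-1)//2) per segment.
import Mathlib
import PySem

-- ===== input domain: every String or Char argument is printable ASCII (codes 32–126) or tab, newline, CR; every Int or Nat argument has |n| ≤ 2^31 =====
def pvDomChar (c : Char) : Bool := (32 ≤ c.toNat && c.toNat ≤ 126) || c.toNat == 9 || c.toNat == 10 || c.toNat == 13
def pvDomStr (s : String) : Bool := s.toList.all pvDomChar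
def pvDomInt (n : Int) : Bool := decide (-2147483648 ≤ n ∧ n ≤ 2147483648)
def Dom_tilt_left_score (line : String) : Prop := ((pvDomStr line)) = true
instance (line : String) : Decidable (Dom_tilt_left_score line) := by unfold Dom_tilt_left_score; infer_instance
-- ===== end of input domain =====

-- B replaces A's per-character free_spot simulation by split('#') into segments plus a
-- closed-form arithmetic-series score per segment (alternative decomposition, same O(n) cost).

-- ===== PORT A =====
def tilt_left_score (line : String) : Int :=
  ((PySem.List.enumerate line.toList 0).foldl
    (fun (st : Int × Int) ic =>
      if ic.2 == '#' then (st.1, ic.1 + 1)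
      else if ic.2 == 'O' then (st.1 + ((PySem.Str.len line : Int) - st.2), st.2 + 1)
      else st) (0, 0)).1

-- ===== PORT B =====
def tilt_left_score_alt (line : String) : Int :=
  ((PySem.Chars.splitOn line.toList ['#']).foldl
    (fun (st : Int × Int) seg =>
      (st.1 + (PySem.Chars.count seg ['O'] : Int) * (PySem.Str.len line : Int)
            - (PySem.Chars.count seg ['O'] : Int) * st.2
            - PySem.Int.floordiv ((PySem.Chars.count seg ['O'] : Int) * ((PySem.Chars.count seg ['O'] : Int) - 1)) 2,
       st.2 + (PySem.Chars.len seg : Int) + 1)) (0, 0)).1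

-- ===== PRECONDITION & SPEC =====
def Spec_tilt_left_score (line : String) (out : Int) : Prop := out = tilt_left_score_alt line
instance (line : String) (out : Int) : Decidable (Spec_tilt_left_score line out) := by unfold Spec_tilt_left_score; infer_instance

-- ===== CLAIM (what is proved, stated in full; the proofs are below) =====
def Claim_equal_tilt_left_score : Prop := ∀ (line : String), Dom_tilt_left_score line → Spec_tilt_left_score line (tilt_left_score line)

-- ===== LEMMAS AND PROOFS =====

-- A's loop step, abstracted over the constant N = len(line)
def pvStepA (N : Int) (st : Int × Int) (ic : Int × Char) : Int × Int :=
  if ic.2 == '#' then (st.1, ic.1 + 1)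
  else if ic.2 == 'O' then (st.1 + (N - st.2), st.2 + 1)
  else st

-- B's loop step, abstracted likewise (counts via List.count)
def pvStepB (N : Int) (st : Int × Int) (seg : List Char) : Int × Int :=
  (st.1 + (seg.count 'O' : Int) * N - (seg.count 'O' : Int) * st.2
        - PySem.Int.floordiv ((seg.count 'O' : Int) * ((seg.count 'O' : Int) - 1)) 2,
   st.2 + (seg.length : Int) + 1)

-- closed-form score of one segment of c rocks settling at start s
def pvSegScore (N s c : Int) : Int :=
  c * N - c * s - PySem.Int.floordiv (c * (c - 1)) 2

-- reference splitter: split on '#', keeping empty pieces (what str.split('#') does)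
def pvSplitHash : List Char → List (List Char)
  | [] => [[]]
  | c :: rest =>
    if c = '#' then [] :: pvSplitHash rest
    else match pvSplitHash rest with
      | [] => [[c]]
      | h :: t => (c :: h) :: t

def pvConsHead (pre : List Char) : List (List Char) → List (List Char)
  | [] => [pre]
  | h :: t => (pre ++ h) :: t

theorem pvSplitHash_ne_nil (cs : List Char) : pvSplitHash cs ≠ [] := by
  cases cs with
  | nil => simp [pvSplitHash]
  | cons c rest =>
    simp only [pvSplitHash]
    split_ifs
    · simp
    · cases h : pvSplitHash rest <;> simp

theorem pvFloordiv_two_mul (k : Int) : PySem.Int.floordiv (2 * k) 2 = k := by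
  rw [PySem.Int.floordiv_eq_ediv_of_pos (by norm_num)]
  omega

theorem pvSegScore_zero (N s : Int) : pvSegScore N s 0 = 0 := by
  have h : (0 : Int) * (0 - 1) = 2 * 0 := by ring
  rw [pvSegScore, h, pvFloordiv_two_mul]
  ring

theorem pvSegScore_succ (N s c : Int) :
    pvSegScore N s (c + 1) = (N - s) + pvSegScore N (s + 1) c := by
  obtain ⟨k, hk⟩ := Int.even_mul_succ_self (c - 1)
  have h1 : c * (c - 1) = 2 * k := by nlinarith [hk]
  have h2 : (c + 1) * (c + 1 - 1) = 2 * (k + c) := by nlinarith [hk]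
  rw [pvSegScore, pvSegScore, h1, h2, pvFloordiv_two_mul, pvFloordiv_two_mul]
  ring

-- splitOn.go with separator "#" computes pvSplitHash
theorem pvGoSplit (fuel : Nat) : ∀ (l cur : List Char) (acc : List (List Char)),
    l.length ≤ fuel →
    PySem.Chars.splitOn.go ['#'] fuel l cur acc
      = acc.reverse ++ pvConsHead cur.reverse (pvSplitHash l) := by
  induction fuel with
  | zero =>
    intro l cur acc h
    have hl : l = [] := List.eq_nil_of_length_eq_zero (Nat.le_zero.mp h)
    subst hl
    rw [PySem.Chars.splitOn.go.eq_def]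
    simp [pvSplitHash, pvConsHead]
  | succ f ih =>
    intro l cur acc h
    cases l with
    | nil =>
      rw [PySem.Chars.splitOn.go.eq_def]
      simp [pvSplitHash, pvConsHead]
    | cons c rest =>
      rw [PySem.Chars.splitOn.go.eq_def]
      have hpre : (['#'].isPrefixOf (c :: rest)) = ('#' == c) := by
        simp [List.isPrefixOf]
      by_cases hc : c = '#'
      · subst hc
        simp only [hpre, beq_self_eq_true, if_true]
        have hdrop : List.drop (['#'] : List Char).length ('#' :: rest) = rest := rfl
        rw [hdrop, ih rest [] (cur.reverse :: acc) (by simpa using Nat.lt_succ_iff.mp (by simpa using h))]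
        rw [pvSplitHash, if_pos rfl]
        cases hsp : pvSplitHash rest with
        | nil => exact absurd hsp (pvSplitHash_ne_nil rest)
        | cons hh tt => simp [pvConsHead]
      · have hb : ('#' == c) = false := by simp [Ne.symm hc]
        simp only [hpre, hb, Bool.false_eq_true, if_false]
        rw [ih rest (c :: cur) acc (by simpa using Nat.lt_succ_iff.mp (by simpa using h))]
        rw [pvSplitHash, if_neg hc]
        cases hsp : pvSplitHash rest with
        | nil => exact absurd hsp (pvSplitHash_ne_nil rest)
        | cons hh tt => simp [pvConsHead]

theorem pvSplitOn_hash (cs : List Char) :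
    PySem.Chars.splitOn cs ['#'] = pvSplitHash cs := by
  rw [PySem.Chars.splitOn]
  rw [pvGoSplit (cs.length + 1) cs [] [] (by omega)]
  cases hsp : pvSplitHash cs with
  | nil => exact absurd hsp (pvSplitHash_ne_nil cs)
  | cons hh tt => simp [pvConsHead]

-- count.go with needle "O" counts the character 'O'
theorem pvGoCount (fuel : Nat) : ∀ (l : List Char) (acc : Nat),
    l.length ≤ fuel →
    PySem.Chars.count.go ['O'] fuel l acc = acc + l.count 'O' := by
  induction fuel with
  | zero =>
    intro l acc h
    have hl : l = [] := List.eq_nil_of_length_eq_zero (Nat.le_zero.mp h)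
    subst hl
    rw [PySem.Chars.count.go.eq_def]
    simp
  | succ f ih =>
    intro l acc h
    cases l with
    | nil =>
      rw [PySem.Chars.count.go.eq_def]
      simp
    | cons c rest =>
      rw [PySem.Chars.count.go.eq_def]
      have hpre : (['O'].isPrefixOf (c :: rest)) = ('O' == c) := by
        simp [List.isPrefixOf]
      by_cases hc : c = 'O'
      · subst hc
        simp only [hpre, beq_self_eq_true, if_true]
        have hdrop : List.drop (['O'] : List Char).length ('O' :: rest) = rest := rfl
        rw [hdrop, ih rest (acc + 1) (by simpa using Nat.lt_succ_iff.mp (by simpa using h))]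
        rw [List.count_cons_self]
        omega
      · have hb : ('O' == c) = false := by simp [Ne.symm hc]
        simp only [hpre, hb, Bool.false_eq_true, if_false]
        rw [ih rest acc (by simpa using Nat.lt_succ_iff.mp (by simpa using h))]
        rw [List.count_cons_of_ne (by simp [hc])]

theorem pvCount_hash (seg : List Char) :
    PySem.Chars.count seg ['O'] = seg.count 'O' := by
  rw [PySem.Chars.count]
  simp only [List.isEmpty_cons, if_false, Bool.false_eq_true]
  rw [pvGoCount seg.length seg 0 le_rfl]
  omega

theorem pvSplitHash_no_hash (cs : List Char) (h : ∀ ch ∈ cs, ch ≠ '#') :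
    pvSplitHash cs = [cs] := by
  induction cs with
  | nil => rfl
  | cons c rest ih =>
    have hc : c ≠ '#' := h c (by simp)
    rw [pvSplitHash, if_neg hc, ih (fun ch hm => h ch (by simp [hm]))]

theorem pvSplitHash_append (seg rest : List Char) (h : ∀ ch ∈ seg, ch ≠ '#') :
    pvSplitHash (seg ++ '#' :: rest) = seg :: pvSplitHash rest := by
  induction seg with
  | nil => simp [pvSplitHash]
  | cons c s ih =>
    have hc : c ≠ '#' := h c (by simp)
    rw [List.cons_append, pvSplitHash, if_neg hc, ih (fun ch hm => h ch (by simp [hm]))]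

theorem pvDropWhile_head (p : Char → Bool) : ∀ (l : List Char) (c : Char) (rest : List Char),
    l.dropWhile p = c :: rest → p c = false := by
  intro l
  induction l with
  | nil => intro c rest h; simp [List.dropWhile] at h
  | cons x xs ih =>
    intro c rest h
    rw [List.dropWhile_cons] at h
    by_cases hp : p x
    · rw [if_pos hp] at h; exact ih c rest h
    · rw [if_neg hp] at h
      obtain ⟨h1, -⟩ := List.cons.injEq .. ▸ h
      rw [← h1]
      simpa using hp

-- segment lemma: A's loop over a '#'-free segment
theorem pvSeg (N : Int) (seg : List Char) (h : ∀ ch ∈ seg, ch ≠ '#') :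
    ∀ (score f i : Int),
      (PySem.List.enumerate seg i).foldl (pvStepA N) (score, f)
        = (score + pvSegScore N f (seg.count 'O'), f + (seg.count 'O' : Int)) := by
  induction seg with
  | nil => intro score f i; simp [PySem.List.enumerate, pvSegScore_zero]
  | cons c rest ih =>
    intro score f i
    have hc : c ≠ '#' := h c (by simp)
    have hrest : ∀ ch ∈ rest, ch ≠ '#' := fun ch hm => h ch (by simp [hm])
    rw [PySem.List.enumerate_cons, List.foldl_cons]
    by_cases hO : c = 'O'
    · subst hO
      have hs : pvStepA N (score, f) (i, 'O') = (score + (N - f), f + 1) := by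
        simp [pvStepA]
      rw [hs, ih hrest]
      rw [List.count_cons_self]
      push_cast
      rw [pvSegScore_succ]
      simp only [Prod.mk.injEq]
      constructor <;> ring
    · have hs : pvStepA N (score, f) (i, c) = (score, f) := by
        simp [pvStepA, hc, hO]
      rw [hs, ih hrest, List.count_cons_of_ne (by simp [hO])]

-- main lemma: A's loop equals B's fold over the '#'-segments, whenever the loop
-- starts at a segment boundary (free_spot = current index = s)
theorem pvMain (n : Nat) : ∀ (N : Int) (cs : List Char), cs.length ≤ n →
    ∀ (score s : Int),
      ((PySem.List.enumerate cs s).foldl (pvStepA N) (score, s)).1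
        = ((pvSplitHash cs).foldl (pvStepB N) (score, s)).1 := by
  induction n using Nat.strong_induction_on with
  | _ n ih =>
    intro N cs hlen score s
    have hsplit := (List.takeWhile_append_dropWhile (p := fun c => c != '#') (l := cs)).symm
    set seg := cs.takeWhile (fun c => c != '#') with hsegdef
    set d := cs.dropWhile (fun c => c != '#') with hddef
    have hseg : ∀ ch ∈ seg, ch ≠ '#' := by
      intro ch hm
      have := List.mem_takeWhile_imp hm
      simpa using this
    cases hd : d with
    | nil =>
      have hcs : cs = seg := by rw [hsplit, hd, List.append_nil]
      rw [hcs, pvSeg N seg hseg, pvSplitHash_no_hash seg hseg]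
      dsimp only [List.foldl_cons, List.foldl_nil, pvStepB]
      unfold pvSegScore
      ring
    | cons c rest =>
      have hc : c = '#' := by
        have h2 := pvDropWhile_head (fun x => x != '#') cs c rest (hddef.symm.trans hd)
        simpa using h2
      have hcs : cs = seg ++ '#' :: rest := by rw [hsplit, hd, hc]
      have hlrest : rest.length < n := by
        have hl2 : cs.length = seg.length + rest.length + 1 := by
          rw [hcs]; simp [List.length_append]; omega
        omega
      rw [hcs, pvSplitHash_append seg rest hseg,
          PySem.List.enumerate_append, List.foldl_append, pvSeg N seg hseg,
          PySem.List.enumerate_cons, List.foldl_cons]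
      have hstep : pvStepA N (score + pvSegScore N s (seg.count 'O'), s + (seg.count 'O' : Int))
          (s + (seg.length : Int), '#')
          = (score + pvSegScore N s (seg.count 'O'), s + (seg.length : Int) + 1) := by
        simp [pvStepA]
      rw [hstep, ih rest.length hlrest N rest le_rfl]
      rw [List.foldl_cons]
      have hst : pvStepB N (score, s) seg
          = (score + pvSegScore N s (seg.count 'O'), s + (seg.length : Int) + 1) := by
        simp only [pvStepB, pvSegScore, Prod.mk.injEq]
        exact ⟨by ring, trivial⟩
      rw [hst]

-- ===== VERDICT (by name: the statement is the Claim_ definition above) =====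
theorem tilt_left_score_spec : Claim_equal_tilt_left_score := by
  intro line _
  unfold Spec_tilt_left_score tilt_left_score tilt_left_score_alt
  rw [pvSplitOn_hash]
  have hA : (fun (st : Int × Int) (ic : Int × Char) =>
      if ic.2 == '#' then (st.1, ic.1 + 1)
      else if ic.2 == 'O' then (st.1 + ((PySem.Str.len line : Int) - st.2), st.2 + 1)
      else st) = pvStepA (PySem.Str.len line : Int) := by
    funext st ic; rfl
  have hB : (fun (st : Int × Int) (seg : List Char) =>
      (st.1 + (PySem.Chars.count seg ['O'] : Int) * (PySem.Str.len line : Int)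
            - (PySem.Chars.count seg ['O'] : Int) * st.2
            - PySem.Int.floordiv ((PySem.Chars.count seg ['O'] : Int) * ((PySem.Chars.count seg ['O'] : Int) - 1)) 2,
       st.2 + (PySem.Chars.len seg : Int) + 1)) = pvStepB (PySem.Str.len line : Int) := by
    funext st seg
    simp [pvStepB, pvCount_hash, PySem.Chars.len]
  rw [hA, hB]
  exact pvMain line.toList.length (PySem.Str.len line : Int) line.toList le_rfl 0 0
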